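-- pv_equiv track=rewrite | github.com/prattsm/battleship-calculator | battleship/strategies/selection.py | _mask_to_cells
-- ===== SOURCE A (Python) =====
-- from typing import Dict, List, Optional, Sequence, Set, Tuple
--
-- def _mask_to_cells(mask: int, board_size: int) -> List[Tuple[int, int]]:
--     cells: List[Tuple[int, int]] = []
--     m = mask
--     while m:
--         lsb = m & -m
--         idx = lsb.bit_length() - 1
--         cells.append(divmod(idx, board_size))
--         m ^= lsb
--     return cells
-- ===== SOURCE B (Python) =====
-- from typing import List, Tuple
--
-- def _mask_to_cells(mask: int, board_size: int) -> List[Tuple[int, int]]: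
--     bits = bin(mask)[2:][::-1]
--     return [divmod(i, board_size) for i, c in enumerate(bits) if c == '1']
-- ===== Notes on version B (the rewrite author's own statement) =====
-- stated objective: idiomatic
-- what changed: Instead of a while loop repeatedly isolating the lowest set bit with m & -m and bit_length, B formats the mask once as a binary string with bin(), reverses it so index = bit position, and builds the result with a single enumerate-filter comprehension.
import Mathlib
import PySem

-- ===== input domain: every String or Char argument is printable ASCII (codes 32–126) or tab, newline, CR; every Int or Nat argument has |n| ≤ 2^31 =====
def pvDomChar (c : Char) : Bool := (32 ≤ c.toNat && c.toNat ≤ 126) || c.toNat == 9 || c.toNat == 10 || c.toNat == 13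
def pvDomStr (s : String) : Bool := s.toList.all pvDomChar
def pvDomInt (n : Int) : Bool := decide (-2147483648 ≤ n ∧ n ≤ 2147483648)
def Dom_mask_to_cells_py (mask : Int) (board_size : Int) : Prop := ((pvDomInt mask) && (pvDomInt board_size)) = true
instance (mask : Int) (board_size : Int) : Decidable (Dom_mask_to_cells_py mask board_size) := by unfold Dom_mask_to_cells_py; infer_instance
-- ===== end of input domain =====

-- One honest line: B formats the mask once with bin(), reverses the digit string and
-- reads the set-bit positions off an enumerate-filter comprehension, instead of A's
-- while loop that isolates the lowest set bit with m & -m (objective: idiomatic).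

-- ===== PORT A =====
-- A's while-loop as fuel recursion; fuel mask.toNat + 1 is enough since m strictly
-- decreases each step (m ^= lsb removes a set bit) — the fuel is a totality guard only.
def pvLoopA (fuel : Nat) (m : Int) (bs : Int) : List (Int × Int) :=
  match fuel with
  | 0 => []
  | f + 1 =>
    if m = 0 then []
    else
      let lsb := PySem.Int.band m (-m)
      let idx : Int := (PySem.Int.bitLength lsb : Int) - 1
      ((PySem.Int.divmod? idx bs).getD (0, 0)) :: pvLoopA f (PySem.Int.bxor m lsb) bs

def mask_to_cells_py (mask : Int) (board_size : Int) : List (Int × Int) :=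
  pvLoopA (mask.toNat + 1) mask board_size

-- ===== PORT B =====
-- bin(mask)[2:][::-1], then the comprehension [divmod(i, bs) for i, c in enumerate(bits) if c == '1'].
-- The [::-1] slice always succeeds in Python (step ≠ 0), so .getD "" never fires.
def mask_to_cells_py_alt (mask : Int) (board_size : Int) : List (Int × Int) :=
  (PySem.List.enumerate
      ((PySem.Str.slice? (PySem.Str.slice (PySem.Int.pyBin mask) (some 2) none)
          none none (-1)).getD "").toList).flatMap
    (fun p => if p.2 = '1' then [((PySem.Int.divmod? p.1 board_size).getD (0, 0))] else [])

-- ===== PRECONDITION & SPEC =====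
-- Pre_ excludes exactly the inputs where A does not return: mask < 0 (the loop never
-- terminates) and mask ≠ 0 with board_size = 0 (divmod raises ZeroDivisionError).
def Pre_mask_to_cells_py (mask : Int) (board_size : Int) : Prop :=
  0 ≤ mask ∧ (mask = 0 ∨ board_size ≠ 0)
instance (mask : Int) (board_size : Int) : Decidable (Pre_mask_to_cells_py mask board_size) := by
  unfold Pre_mask_to_cells_py; infer_instance

def pvWitness_mask_to_cells_py : Int × Int := (5, 2)

def Spec_mask_to_cells_py (mask : Int) (board_size : Int) (out : List (Int × Int)) : Prop :=
  out = mask_to_cells_py_alt mask board_size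
instance (mask : Int) (board_size : Int) (out : List (Int × Int)) : Decidable (Spec_mask_to_cells_py mask board_size out) := by
  unfold Spec_mask_to_cells_py; infer_instance

-- ===== CLAIM (what is proved, stated in full; the proofs are below) =====
def Claim_equal_mask_to_cells_py : Prop := ∀ (mask : Int) (board_size : Int), Dom_mask_to_cells_py mask board_size → Pre_mask_to_cells_py mask board_size → Spec_mask_to_cells_py mask board_size (mask_to_cells_py mask board_size)

-- ===== LEMMAS AND PROOFS =====

-- the cell appended for bit position idx (board_size ≠ 0)
def pvCell (idx bs : Int) : Int × Int := ((PySem.Int.divmod? idx bs).getD (0, 0))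

-- reference: scan the bits of n from position idx upward
def pvG (n : Nat) (idx bs : Int) : List (Int × Int) :=
  if n = 0 then []
  else (if n % 2 = 1 then [pvCell idx bs] else []) ++ pvG (n / 2) (idx + 1) bs
termination_by n
decreasing_by omega

def pvLsb (n : Nat) : Nat := n - (n &&& (n - 1))

-- the binary digits of n, least-significant first ('' for n = 0)
def pvBits (n : Nat) : List Char :=
  if n = 0 then [] else Nat.digitChar (n % 2) :: pvBits (n / 2)
termination_by n
decreasing_by omega

lemma pvG_even (n : Nat) (h : n % 2 = 0) (idx bs : Int) :
    pvG n idx bs = pvG (n / 2) (idx + 1) bs := by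
  rcases Nat.eq_zero_or_pos n with h0 | h0
  · subst h0; simp [pvG]
  · rw [pvG]; simp [Nat.pos_iff_ne_zero.mp h0, h]

lemma pvG_odd (n : Nat) (h : n % 2 = 1) (idx bs : Int) :
    pvG n idx bs = pvCell idx bs :: pvG (n / 2) (idx + 1) bs := by
  rw [pvG]; simp [h]; omega

lemma and_pred_odd (n : Nat) (h : n % 2 = 1) : n &&& (n - 1) = n - 1 := by
  apply Nat.eq_of_testBit_eq
  intro i
  cases i with
  | zero => simp [Nat.testBit_zero]; omega
  | succ i =>
    rw [Nat.testBit_and]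
    simp only [Nat.testBit_succ]
    have : (n - 1) / 2 = n / 2 := by omega
    rw [this, Bool.and_self]

lemma and_pred_even (n : Nat) (h : n % 2 = 0) (h0 : 0 < n) :
    n &&& (n - 1) = 2 * ((n / 2) &&& (n / 2 - 1)) := by
  apply Nat.eq_of_testBit_eq
  intro i
  cases i with
  | zero => simp [Nat.testBit_zero]; omega
  | succ i =>
    rw [Nat.testBit_and]
    simp only [Nat.testBit_succ]
    have h1 : (n - 1) / 2 = n / 2 - 1 := by omega
    have h2 : 2 * (n / 2 &&& n / 2 - 1) / 2 = n / 2 &&& n / 2 - 1 := by omega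
    rw [h1, h2, Nat.testBit_and]

lemma xor_lsb_odd (n : Nat) (h : n % 2 = 1) : n ^^^ 1 = n - 1 := by
  apply Nat.eq_of_testBit_eq
  intro i
  cases i with
  | zero => simp [Nat.testBit_zero]; omega
  | succ i =>
    rw [Nat.testBit_xor]
    simp only [Nat.testBit_succ]
    have h1 : (1 : Nat) / 2 = 0 := by omega
    have h2 : (n - 1) / 2 = n / 2 := by omega
    rw [h1, h2]
    simp

lemma xor_double (a b : Nat) : (2 * a) ^^^ (2 * b) = 2 * (a ^^^ b) := by
  apply Nat.eq_of_testBit_eq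
  intro i
  cases i with
  | zero => simp [Nat.testBit_zero]
  | succ i =>
    rw [Nat.testBit_xor]
    simp only [Nat.testBit_succ]
    have ha : 2 * a / 2 = a := by omega
    have hb : 2 * b / 2 = b := by omega
    have hc : 2 * (a ^^^ b) / 2 = a ^^^ b := by omega
    rw [ha, hb, hc, Nat.testBit_xor]

lemma pvLsb_pos (n : Nat) (h : 0 < n) : 0 < pvLsb n := by
  have := Nat.and_le_right (n := n) (m := n - 1)
  unfold pvLsb; omega

lemma pvLsb_even (n : Nat) (h : n % 2 = 0) (h0 : 0 < n) :
    pvLsb n = 2 * pvLsb (n / 2) := by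
  unfold pvLsb
  rw [and_pred_even n h h0]
  have := Nat.and_le_right (n := n / 2) (m := n / 2 - 1)
  omega

lemma pvLsb_odd (n : Nat) (h : n % 2 = 1) : pvLsb n = 1 := by
  unfold pvLsb; rw [and_pred_odd n h]; omega

-- key: the reference scan pulls the lowest set bit to the front
lemma pvG_key (n : Nat) (h : 0 < n) (idx bs : Int) :
    pvG n idx bs
      = pvCell (idx + ((PySem.Int.bitLength (pvLsb n : Int) : Int) - 1)) bs
          :: pvG (n ^^^ pvLsb n) idx bs := by
  induction n using Nat.strong_induction_on generalizing idx with
  | _ n ih =>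
    rcases Nat.even_or_odd n with he | ho
    · -- even case
      have hmod : n % 2 = 0 := Nat.even_iff.mp he
      have hhalf : 0 < n / 2 := by omega
      have hl' : 0 < pvLsb (n / 2) := pvLsb_pos _ hhalf
      have hlsb : pvLsb n = 2 * pvLsb (n / 2) := pvLsb_even n hmod h
      have hbl : PySem.Int.bitLength ((2 * pvLsb (n / 2) : Nat) : Int)
          = PySem.Int.bitLength ((pvLsb (n / 2) : Nat) : Int) + 1 := by
        have h2 := PySem.Int.bitLength_natCast (m := 2 * pvLsb (n / 2)) (by omega)
        have h3 : 2 * pvLsb (n / 2) / 2 = pvLsb (n / 2) := by omega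
        rw [h3] at h2
        exact h2
      have hn2 : 2 * (n / 2) = n := by omega
      have hxor : n ^^^ 2 * pvLsb (n / 2) = 2 * ((n / 2) ^^^ pvLsb (n / 2)) := by
        conv_lhs => rw [← hn2]
        rw [xor_double]
        have h3 : 2 * (n / 2) / 2 = n / 2 := by omega
        rw [h3]
      rw [pvG_even n hmod, ih (n / 2) (by omega) hhalf (idx + 1), hlsb, hbl, hxor,
        pvG_even (2 * ((n / 2) ^^^ pvLsb (n / 2))) (by omega)]
      have hdiv : 2 * ((n / 2) ^^^ pvLsb (n / 2)) / 2 = (n / 2) ^^^ pvLsb (n / 2) := by omega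
      rw [hdiv]
      congr 2
      push_cast
      ring
    · -- odd case
      have hmod : n % 2 = 1 := Nat.odd_iff.mp ho
      have hlsb : pvLsb n = 1 := pvLsb_odd n hmod
      have hbl : PySem.Int.bitLength ((1 : Nat) : Int) = 1 := by decide
      rw [pvG_odd n hmod, hlsb, hbl, xor_lsb_odd n hmod,
        pvG_even (n - 1) (by omega)]
      have hdiv : (n - 1) / 2 = n / 2 := by omega
      rw [hdiv]
      norm_num

lemma xor_lsb_lt (n : Nat) (h : 0 < n) : n ^^^ pvLsb n < n := by
  induction n using Nat.strong_induction_on with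
  | _ n ih =>
    rcases Nat.even_or_odd n with he | ho
    · have hmod : n % 2 = 0 := Nat.even_iff.mp he
      have hhalf : 0 < n / 2 := by omega
      have hlsb : pvLsb n = 2 * pvLsb (n / 2) := pvLsb_even n hmod h
      have hn2 : 2 * (n / 2) = n := by omega
      have hxor : n ^^^ 2 * pvLsb (n / 2) = 2 * ((n / 2) ^^^ pvLsb (n / 2)) := by
        conv_lhs => rw [← hn2]
        rw [xor_double]
        have h3 : 2 * (n / 2) / 2 = n / 2 := by omega
        rw [h3]
      have := ih (n / 2) (by omega) hhalf
      rw [hlsb, hxor]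
      omega
    · have hmod : n % 2 = 1 := Nat.odd_iff.mp ho
      have hlsb : pvLsb n = 1 := pvLsb_odd n hmod
      rw [hlsb, xor_lsb_odd n hmod]
      omega

lemma band_neg_self (n : Nat) (h : 0 < n) :
    PySem.Int.band (n : Int) (-(n : Int)) = ((pvLsb n : Nat) : Int) := by
  have h1 : ¬ (0 ≤ -(n : Int)) := by omega
  have h2 : (-(-(n : Int)) - 1).toNat = n - 1 := by omega
  simp only [PySem.Int.band, Int.natCast_nonneg, if_true, h1, if_false, h2,
    Int.toNat_natCast, pvLsb]

lemma loopA_eq (fuel n : Nat) (bs : Int) (hf : n < fuel) :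
    pvLoopA fuel (n : Int) bs = pvG n 0 bs := by
  induction fuel generalizing n with
  | zero => omega
  | succ f ihf =>
    rcases Nat.eq_zero_or_pos n with h0 | h0
    · subst h0; simp [pvLoopA, pvG]
    · have hne : (n : Int) ≠ 0 := by omega
      rw [pvLoopA]
      simp only [hne, if_false]
      rw [band_neg_self n h0, PySem.Int.bxor_natCast,
        ihf (n ^^^ pvLsb n) (by have := xor_lsb_lt n h0; omega),
        pvG_key n h0 0 bs]
      congr 1
      simp [pvCell]

-- B side: Nat.toDigits 2 writes the digits of n most-significant first
lemma toDigitsCore_eq (fuel n : Nat) (ds : List Char) (h0 : 0 < n) (hf : n ≤ fuel) :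
    Nat.toDigitsCore 2 fuel n ds = (pvBits n).reverse ++ ds := by
  induction n using Nat.strong_induction_on generalizing fuel ds with
  | _ n ih =>
    obtain ⟨f, rfl⟩ : ∃ f, fuel = f + 1 := ⟨fuel - 1, by omega⟩
    have hstep : Nat.toDigitsCore 2 (f + 1) n ds
        = (if n / 2 = 0 then Nat.digitChar (n % 2) :: ds
           else Nat.toDigitsCore 2 f (n / 2) (Nat.digitChar (n % 2) :: ds)) := rfl
    rw [hstep, pvBits]
    simp only [Nat.pos_iff_ne_zero.mp h0, if_false, List.reverse_cons, List.append_assoc]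
    by_cases hh : n / 2 = 0
    · simp [hh, pvBits]
    · simp only [hh, if_false]
      rw [ih (n / 2) (by omega) f (Nat.digitChar (n % 2) :: ds) (by omega) (by omega)]
      simp

lemma toDigits_reverse (n : Nat) (h0 : 0 < n) :
    (Nat.toDigits 2 n).reverse = pvBits n := by
  unfold Nat.toDigits
  rw [toDigitsCore_eq (n + 1) n [] h0 (by omega)]
  simp

-- the comprehension over the LSB-first digits is exactly the reference scan
lemma flatMap_pvBits (n : Nat) (idx bs : Int) :
    (PySem.List.enumerate (pvBits n) idx).flatMap
        (fun p => if p.2 = '1' then [((PySem.Int.divmod? p.1 bs).getD (0, 0))] else [])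
      = pvG n idx bs := by
  induction n using Nat.strong_induction_on generalizing idx with
  | _ n ih =>
    rcases Nat.eq_zero_or_pos n with h0 | h0
    · subst h0; simp [pvBits, pvG, PySem.List.enumerate_nil]
    · rw [pvBits]
      simp only [Nat.pos_iff_ne_zero.mp h0, if_false]
      rw [PySem.List.enumerate_cons, List.flatMap_cons, ih (n / 2) (by omega) (idx + 1)]
      rcases Nat.even_or_odd n with he | ho
      · have hmod : n % 2 = 0 := Nat.even_iff.mp he
        rw [pvG_even n hmod, hmod]
        simp [Nat.digitChar]
      · have hmod : n % 2 = 1 := Nat.odd_iff.mp ho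
        rw [pvG_odd n hmod, hmod]
        simp [Nat.digitChar, pvCell]

lemma alt_eq (n : Nat) (bs : Int) : mask_to_cells_py_alt (n : Int) bs = pvG n 0 bs := by
  unfold mask_to_cells_py_alt
  have hbits : ((PySem.Str.slice? (PySem.Str.slice (PySem.Int.pyBin (n : Int)) (some 2) none)
      none none (-1)).getD "").toList = (Nat.toDigits 2 n).reverse := by
    rw [PySem.Str.slice?_none_none_neg_one]
    simp only [Option.getD_some]
    rw [String.toList_ofList, List.reverse_inj]
    have h1 : (PySem.Str.slice (PySem.Int.pyBin (n : Int)) (some 2) none).toList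
        = (PySem.Int.pyBin (n : Int)).toList.drop 2 := by
      rw [PySem.Str.toList_slice, PySem.Chars.slice_eq_listSlice]
      have : ((2 : Nat) : Int) = (2 : Int) := by norm_num
      rw [← this, PySem.List.slice_from_natCast]
    rw [h1, PySem.Int.toList_pyBin]
    unfold PySem.Int.toBinChars0b
    have hlt : ¬ ((n : Int) < 0) := by omega
    simp [hlt, Int.toNat_natCast]
  rw [hbits]
  rcases Nat.eq_zero_or_pos n with h0 | h0
  · subst h0
    have : Nat.toDigits 2 0 = ['0'] := by decide
    rw [this]
    simp [PySem.List.enumerate_cons, PySem.List.enumerate_nil, pvG]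
  · rw [toDigits_reverse n h0, flatMap_pvBits]

-- ===== VERDICT (by name: the statement is the Claim_ definition above) =====
theorem mask_to_cells_py_spec : Claim_equal_mask_to_cells_py := by
  intro mask bs _ hpre
  obtain ⟨hm, _⟩ := hpre
  unfold Spec_mask_to_cells_py mask_to_cells_py
  obtain ⟨n, rfl⟩ : ∃ n : Nat, mask = (n : Int) := ⟨mask.toNat, (Int.toNat_of_nonneg hm).symm⟩
  rw [loopA_eq _ n bs (by simp), alt_eq n bs]
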